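-- pv_equiv track=rewrite | github.com/voicetreelab/voicetree | backend/text_to_graph_pipeline/tree_manager/markdown_to_tree.py | _extract_summary_and_content
-- ===== SOURCE A (Python) =====
-- from typing import Dict, Optional, List, Tuple
--
-- def _extract_summary_and_content(markdown_content: str) -> Tuple[str, str]:
--     """
--     Extract summary and main content from markdown
--
--     Args:
--         markdown_content: Markdown content after frontmatter
--
--     Returns:
--         Tuple of (summary, content)
--     """
--     lines = markdown_content.strip().split('\n')
--     summary = ""
--     content_lines = []
--     found_summary = False
--
--     for i, line in enumerate(lines):
--         # Check if line is a summary (starts with ###)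
--         if line.strip().startswith('###') and not found_summary:
--             summary = line.strip().lstrip('#').strip()
--             found_summary = True
--             # Skip this line - don't add summary line to content
--             continue
--         elif line.strip() == '-----------------':
--             # Stop before the links section
--             break
--         elif found_summary:
--             content_lines.append(line)
--         elif not found_summary:
--             # If no summary found yet, these lines are part of content
--             content_lines.append(line)
--
--     # Join content lines and clean up
--     content = '\n'.join(content_lines).strip()
--
--     # Don't automatically create summary from first line
--     # Only return summary if explicitly found with ### prefix
--
--     return summary, content
-- ===== SOURCE B (Python) =====
-- def _extract_summary_and_content(markdown_content: str):
--     """Find-separator-then-slice-then-extract: cut at the first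
--     '-----------------' line, pick the first '###' line in the prefix as
--     summary, join the rest as content."""
--     lines = markdown_content.strip().split('\n')
--     cut = next((i for i, l in enumerate(lines)
--                 if l.strip() == '-----------------'), len(lines))
--     prefix = lines[:cut]
--     sidx = next((i for i, l in enumerate(prefix)
--                  if l.strip().startswith('###')), None)
--     if sidx is None:
--         return "", '\n'.join(prefix).strip()
--     summary = prefix[sidx].strip().lstrip('#').strip()
--     content = '\n'.join(prefix[:sidx] + prefix[sidx + 1:]).strip()
--     return summary, content
-- ===== Notes on version B (the rewrite author's own statement) =====
-- stated objective: alternative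
-- what changed: Replaced the single flag-threaded loop (found_summary state, break on separator) by a find-then-slice decomposition: locate the separator line first, slice the prefix, then find and excise the summary line within it.
import Mathlib
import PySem

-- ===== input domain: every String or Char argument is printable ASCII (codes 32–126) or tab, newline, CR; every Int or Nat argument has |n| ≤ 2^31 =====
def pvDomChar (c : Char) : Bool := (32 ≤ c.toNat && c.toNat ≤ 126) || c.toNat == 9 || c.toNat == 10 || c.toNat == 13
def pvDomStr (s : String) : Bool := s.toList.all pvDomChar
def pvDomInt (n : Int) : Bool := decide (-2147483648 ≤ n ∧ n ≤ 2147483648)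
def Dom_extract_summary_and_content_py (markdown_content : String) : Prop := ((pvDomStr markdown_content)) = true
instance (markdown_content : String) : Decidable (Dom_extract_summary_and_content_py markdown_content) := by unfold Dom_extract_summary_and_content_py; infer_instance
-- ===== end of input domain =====

-- B replaces A's single flag-threaded loop by a find-separator / slice / excise-summary decomposition; same O(n) cost (objective: alternative).

-- shared helpers: the Python expressions both sources contain verbatim
-- markdown_content.strip().split('\n')
def pvLines (s : String) : List (List Char) :=
  PySem.Chars.splitOn (PySem.Chars.strip s.toList) ['\n']
-- line.strip() == '-----------------'
def pvIsSep (l : List Char) : Bool := PySem.Chars.strip l == "-----------------".toList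
-- line.strip().startswith('###')
def pvIsHdr (l : List Char) : Bool := PySem.Chars.startswith (PySem.Chars.strip l) "###".toList
-- line.strip().lstrip('#').strip()  (hand port of lstrip('#'): drop leading '#' characters — exact)
def pvMkSummary (l : List Char) : List Char :=
  PySem.Chars.strip ((PySem.Chars.strip l).dropWhile (· == '#'))

-- ===== PORT A =====
-- A's for-loop with `found_summary` flag, `continue` on the summary line and `break` on the separator
def pvLoopA : List (List Char) → List Char → List (List Char) → Bool → List Char × List (List Char)
  | [], summary, acc, _ => (summary, acc)
  | l :: rest, summary, acc, found =>
    if pvIsHdr l && !found then pvLoopA rest (pvMkSummary l) acc true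
    else if pvIsSep l then (summary, acc)
    else if found then pvLoopA rest summary (acc ++ [l]) found
    else pvLoopA rest summary (acc ++ [l]) found

def extract_summary_and_content_py (markdown_content : String) : String × String :=
  let r := pvLoopA (pvLines markdown_content) [] [] false
  (String.ofList r.1, String.ofList (PySem.Chars.strip (PySem.Chars.join ['\n'] r.2)))

-- ===== PORT B =====
-- Source B: cut at first separator, slice the prefix, find the summary line, excise it
def pvBPair (lines : List (List Char)) : List Char × List (List Char) :=
  let cut := lines.findIdx pvIsSep            -- next(..., len(lines))
  let pre := lines.take cut                   -- lines[:cut]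
  match pre.findIdx? pvIsHdr with             -- next(..., None)
  | none => ([], pre)
  | some i => (pvMkSummary (pre.getD i []), pre.take i ++ pre.drop (i + 1))

def extract_summary_and_content_py_alt (markdown_content : String) : String × String :=
  let r := pvBPair (pvLines markdown_content)
  (String.ofList r.1, String.ofList (PySem.Chars.strip (PySem.Chars.join ['\n'] r.2)))

-- ===== PRECONDITION & SPEC =====
def Spec_extract_summary_and_content_py (markdown_content : String) (out : String × String) : Prop := out = extract_summary_and_content_py_alt markdown_content
instance (markdown_content : String) (out : String × String) : Decidable (Spec_extract_summary_and_content_py markdown_content out) := by unfold Spec_extract_summary_and_content_py; infer_instance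

-- ===== CLAIM (what is proved, stated in full; the proofs are below) =====
def Claim_equal_extract_summary_and_content_py : Prop := ∀ (markdown_content : String), Dom_extract_summary_and_content_py markdown_content → Spec_extract_summary_and_content_py markdown_content (extract_summary_and_content_py markdown_content)

-- ===== LEMMAS AND PROOFS =====

-- a summary line never is the separator line
lemma pvHdr_not_sep (l : List Char) (h : pvIsHdr l = true) : pvIsSep l = false := by
  cases hs : pvIsSep l with
  | false => rfl
  | true =>
    exfalso
    unfold pvIsSep at hs
    have hstrip : PySem.Chars.strip l = "-----------------".toList := by
      simpa using hs
    unfold pvIsHdr at h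
    rw [hstrip] at h
    exact absurd h (by decide)

-- once the summary is found, A just copies lines until the separator
lemma pvLoopA_true (lines : List (List Char)) (s : List Char) (acc : List (List Char)) :
    pvLoopA lines s acc true = (s, acc ++ lines.take (lines.findIdx pvIsSep)) := by
  induction lines generalizing acc with
  | nil => simp [pvLoopA]
  | cons l rest ih =>
    by_cases h : pvIsSep l = true
    · simp [pvLoopA, h, List.findIdx_cons]
    · simp [pvLoopA, h, List.findIdx_cons, ih]

-- the main invariant: A's loop from the initial state computes B's pair
lemma pvLoopA_false (lines : List (List Char)) (acc : List (List Char)) :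
    pvLoopA lines [] acc false = ((pvBPair lines).1, acc ++ (pvBPair lines).2) := by
  induction lines generalizing acc with
  | nil => simp [pvLoopA, pvBPair]
  | cons l rest ih =>
    by_cases hH : pvIsHdr l = true
    · have hS := pvHdr_not_sep l hH
      rw [show pvLoopA (l :: rest) [] acc false = pvLoopA rest (pvMkSummary l) acc true by
            simp [pvLoopA, hH]]
      rw [pvLoopA_true]
      simp [pvBPair, List.findIdx_cons, hS, List.findIdx?_cons, hH]
    · by_cases hS : pvIsSep l = true
      · simp [pvLoopA, hH, hS, pvBPair, List.findIdx_cons]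
      · rw [show pvLoopA (l :: rest) [] acc false = pvLoopA rest [] (acc ++ [l]) false by
              simp [pvLoopA, hH, hS]]
        rw [ih]
        unfold pvBPair
        simp only [List.findIdx_cons, hS, cond_false, List.take_succ_cons,
          List.findIdx?_cons, hH]
        cases hfi : (rest.take (rest.findIdx pvIsSep)).findIdx? pvIsHdr with
        | none => simp
        | some i => simp [List.take_succ_cons, List.drop_succ_cons]

-- ===== VERDICT (by name: the statement is the Claim_ definition above) =====
theorem extract_summary_and_content_py_spec : Claim_equal_extract_summary_and_content_py := by
  intro s _
  unfold Spec_extract_summary_and_content_py extract_summary_and_content_py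
    extract_summary_and_content_py_alt
  rw [pvLoopA_false]
  simp
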